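-- pv_equiv track=rewrite | github.com/vishank01/DSA-Practice | topic-wise/recursion/07. subsets.py | unique_subset
-- ===== SOURCE A (Python) =====
-- def unique_subset(ip,op="",res=None):
--     if res is None:
--         res=set()
--     if len(ip)==0:
--         res.add(op)
--     else:
--         unique_subset(ip[1:],op,res)
--         unique_subset(ip[1:],op+ip[0],res)
--     return res
-- ===== SOURCE B (Python) =====
-- def unique_subset(ip, op="", res=None):
--     if res is None:
--         res = set()
--     subs = [""]
--     for ch in reversed(ip):
--         subs = subs + [ch + s for s in subs]
--     for s in subs:
--         res.add(op + s)
--     return res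
-- ===== Notes on version B (the rewrite author's own statement) =====
-- stated objective: simpler
-- what changed: Replaces the branching recursion (two recursive calls per character, threading a growing prefix op) with an iterative power-set build: a list of subsequence strings doubled once per character (scanned in reverse), then each one added to res with the op prefix.
import Mathlib
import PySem

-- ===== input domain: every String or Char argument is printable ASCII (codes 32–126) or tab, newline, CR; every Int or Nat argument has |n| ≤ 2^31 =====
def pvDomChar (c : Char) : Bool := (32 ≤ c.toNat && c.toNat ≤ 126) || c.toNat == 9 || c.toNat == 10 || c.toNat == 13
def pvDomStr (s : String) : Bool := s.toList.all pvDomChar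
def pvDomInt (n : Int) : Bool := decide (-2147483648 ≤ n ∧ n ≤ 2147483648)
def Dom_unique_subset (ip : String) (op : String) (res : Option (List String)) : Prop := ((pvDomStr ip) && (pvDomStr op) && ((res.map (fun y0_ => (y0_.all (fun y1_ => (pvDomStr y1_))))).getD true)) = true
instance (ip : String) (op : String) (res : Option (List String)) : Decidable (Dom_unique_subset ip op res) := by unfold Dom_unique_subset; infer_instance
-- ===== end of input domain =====

-- B replaces the double recursion by an iterative power-set build; both A and B mutate the
-- passed-in res set identically (add elements) and return it — the claim is about the return value.

-- ===== PORT A =====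
-- recursion on the character list of ip; res is the Python set threaded through the calls
def uniqueSubsetAux (ip : List Char) (op : String) (res : PySem.Set String) : PySem.Set String :=
  match ip with
  | [] => PySem.Set.add res op                              -- res.add(op)
  | c :: rest =>
      -- unique_subset(ip[1:], op, res); unique_subset(ip[1:], op+ip[0], res)
      uniqueSubsetAux rest (op.push c) (uniqueSubsetAux rest op res)

def unique_subset (ip : String) (op : String) (res : Option (List String)) : List String :=
  uniqueSubsetAux ip.toList op (res.getD PySem.Set.empty)   -- if res is None: res = set()

-- ===== PORT B =====
-- subs = [""] ; for ch in reversed(ip): subs = subs + [ch + s for s in subs]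
def buildSubs (ip : List Char) : List String :=
  ip.reverse.foldl (fun subs c => subs ++ subs.map (fun s => String.singleton c ++ s)) [""]

def unique_subset_alt (ip : String) (op : String) (res : Option (List String)) : List String :=
  -- for s in subs: res.add(op + s)
  (buildSubs ip.toList).foldl (fun a s => PySem.Set.add a (op ++ s)) (res.getD PySem.Set.empty)

-- ===== PRECONDITION & SPEC =====
def Spec_unique_subset (ip : String) (op : String) (res : Option (List String)) (out : List String) : Prop := out = unique_subset_alt ip op res
instance (ip : String) (op : String) (res : Option (List String)) (out : List String) : Decidable (Spec_unique_subset ip op res out) := by unfold Spec_unique_subset; infer_instance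

-- ===== CLAIM (what is proved, stated in full; the proofs are below) =====
def Claim_equal_unique_subset : Prop := ∀ (ip : String) (op : String) (res : Option (List String)), Dom_unique_subset ip op res → Spec_unique_subset ip op res (unique_subset ip op res)

-- ===== LEMMAS AND PROOFS =====

-- A's enumeration order of op-prefixed subsequence strings (with duplicates)
def enumSubs (ip : List Char) (op : String) : List String :=
  match ip with
  | [] => [op]
  | c :: rest => enumSubs rest op ++ enumSubs rest (op.push c)

theorem auxA_eq_foldl (ip : List Char) (op : String) (res : PySem.Set String) :
    uniqueSubsetAux ip op res = (enumSubs ip op).foldl PySem.Set.add res := by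
  induction ip generalizing op res with
  | nil => simp [uniqueSubsetAux, enumSubs]
  | cons c rest ih => simp [uniqueSubsetAux, enumSubs, List.foldl_append, ih]

theorem enumSubs_map (ip : List Char) (op : String) :
    enumSubs ip op = (enumSubs ip "").map (fun s => op ++ s) := by
  induction ip generalizing op with
  | nil => simp [enumSubs]
  | cons c rest ih =>
      rw [enumSubs, enumSubs, ih op, ih (String.push op c), ih (String.push "" c)]
      simp only [List.map_append, List.map_map]
      congr 1
      simp only [Function.comp_def]
      apply List.map_congr_left
      intro s _
      show String.push op c ++ s = op ++ (String.push "" c ++ s)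
      apply String.toList_inj.mp
      simp

theorem buildSubs_eq_enum (ip : List Char) : buildSubs ip = enumSubs ip "" := by
  induction ip with
  | nil => rfl
  | cons c rest ih =>
      rw [enumSubs, buildSubs, List.reverse_cons, List.foldl_append]
      have hb : List.foldl (fun subs c => subs ++ subs.map (fun s => String.singleton c ++ s))
          [""] rest.reverse = buildSubs rest := rfl
      rw [hb, ih, enumSubs_map rest (String.push "" c)]
      simp only [List.foldl_cons, List.foldl_nil]
      have hc : ("".push c : String) = String.singleton c := by
        apply String.toList_inj.mp; simp
      rw [hc]

-- ===== VERDICT (by name: the statement is the Claim_ definition above) =====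
theorem unique_subset_spec : Claim_equal_unique_subset := by
  intro ip op res _
  show unique_subset ip op res = unique_subset_alt ip op res
  rw [unique_subset, unique_subset_alt, auxA_eq_foldl, buildSubs_eq_enum,
      enumSubs_map ip.toList op, List.foldl_map]
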